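-- pv_equiv track=rewrite | github.com/mikedmote52/AMC-trader | backend/src/services/short_interest_service.py | _guess_sector
-- ===== SOURCE A (Python) =====
-- def _guess_sector(symbol: str) -> str:
--     """Simple sector guessing based on symbol patterns"""
--     # This is a simplified heuristic - in production you'd use proper sector data
--     tech_patterns = ['NVDA', 'AAPL', 'MSFT', 'GOOGL', 'QUBT', 'PLTR']
--     energy_patterns = ['WULF', 'RIOT', 'MARA', 'HUT', 'BITF', 'CLSK']
--     healthcare_patterns = ['TEVA', 'RGTI', 'OCGN', 'COTI', 'SERA']
--
--     if symbol in tech_patterns or any(pattern in symbol for pattern in ['TECH', 'SOFT', 'DATA']):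
--         return 'technology'
--     elif symbol in energy_patterns or any(pattern in symbol for pattern in ['MINE', 'OIL', 'GAS']):
--         return 'energy'
--     elif symbol in healthcare_patterns or any(pattern in symbol for pattern in ['BIO', 'PHARM', 'MED']):
--         return 'healthcare'
--     else:
--         return 'default'
-- ===== SOURCE B (Python) =====
-- # Min-rank scorer: one dict lookup for exact tickers plus a single pass over a flat
-- # pattern table keeping the best (lowest) category rank; no per-category if/elif chain.
-- _LABELS = ['technology', 'energy', 'healthcare']
--
-- _EXACT = {}
-- for _r, _syms in enumerate((('NVDA', 'AAPL', 'MSFT', 'GOOGL', 'QUBT', 'PLTR'),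
--                             ('WULF', 'RIOT', 'MARA', 'HUT', 'BITF', 'CLSK'),
--                             ('TEVA', 'RGTI', 'OCGN', 'COTI', 'SERA'))):
--     for _s in _syms:
--         _EXACT[_s] = _r
--
-- _SUBS = [('TECH', 0), ('SOFT', 0), ('DATA', 0),
--          ('MINE', 1), ('OIL', 1), ('GAS', 1),
--          ('BIO', 2), ('PHARM', 2), ('MED', 2)]
--
-- def _guess_sector(symbol: str) -> str:
--     best = _EXACT.get(symbol, 3)
--     for pat, rank in _SUBS:
--         if rank < best and pat in symbol:
--             best = rank
--     return _LABELS[best] if best < 3 else 'default'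
-- ===== Notes on version B (the rewrite author's own statement) =====
-- stated objective: alternative
-- what changed: Replaces the ordered if/elif short-circuit chain by a min-rank scorer: one exact-ticker dict lookup plus a single pass over a flat (pattern, rank) table keeping the lowest matching category rank, then indexing a label list.
import Mathlib
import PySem

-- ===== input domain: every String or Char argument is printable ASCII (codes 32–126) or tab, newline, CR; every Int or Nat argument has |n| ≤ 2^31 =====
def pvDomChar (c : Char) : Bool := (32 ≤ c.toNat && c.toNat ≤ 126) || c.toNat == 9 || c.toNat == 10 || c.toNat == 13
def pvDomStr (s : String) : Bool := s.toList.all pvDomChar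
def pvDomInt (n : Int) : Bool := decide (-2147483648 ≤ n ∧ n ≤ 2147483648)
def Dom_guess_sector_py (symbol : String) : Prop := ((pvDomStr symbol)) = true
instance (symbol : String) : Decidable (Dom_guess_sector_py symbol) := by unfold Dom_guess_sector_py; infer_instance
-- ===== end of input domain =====

-- B replaces A's if/elif short-circuit chain by a min-rank scorer: one exact-ticker dict
-- lookup plus a single flat pattern pass keeping the lowest matching rank (alternative, same cost).


-- ===== PORT A =====
def guess_sector_py (symbol : String) : String :=
  let tech_patterns := ["NVDA", "AAPL", "MSFT", "GOOGL", "QUBT", "PLTR"]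
  let energy_patterns := ["WULF", "RIOT", "MARA", "HUT", "BITF", "CLSK"]
  let healthcare_patterns := ["TEVA", "RGTI", "OCGN", "COTI", "SERA"]
  if tech_patterns.contains symbol || (["TECH", "SOFT", "DATA"].any fun p => PySem.Str.isIn p symbol) then
    "technology"
  else if energy_patterns.contains symbol || (["MINE", "OIL", "GAS"].any fun p => PySem.Str.isIn p symbol) then
    "energy"
  else if healthcare_patterns.contains symbol || (["BIO", "PHARM", "MED"].any fun p => PySem.Str.isIn p symbol) then
    "healthcare"
  else
    "default"

-- ===== PORT B =====
def pvLabels : List String := ["technology", "energy", "healthcare"]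

-- _EXACT, built exactly as Source B builds it: enumerate the three symbol groups, insert each symbol with its rank
def pvExact : PySem.Dict String Int :=
  (PySem.List.enumerate [["NVDA", "AAPL", "MSFT", "GOOGL", "QUBT", "PLTR"],
                         ["WULF", "RIOT", "MARA", "HUT", "BITF", "CLSK"],
                         ["TEVA", "RGTI", "OCGN", "COTI", "SERA"]] 0).foldl
    (fun d p => p.2.foldl (fun d s => d.insert s p.1) d) PySem.Dict.empty

def pvSubs : List (String × Int) :=
  [("TECH", 0), ("SOFT", 0), ("DATA", 0),
   ("MINE", 1), ("OIL", 1), ("GAS", 1),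
   ("BIO", 2), ("PHARM", 2), ("MED", 2)]

def guess_sector_py_alt (symbol : String) : String :=
  let best :=
    pvSubs.foldl
      (fun best p => if p.2 < best && PySem.Str.isIn p.1 symbol then p.2 else best)
      (pvExact.getD symbol 3)
  if best < 3 then PySem.List.pyGetD pvLabels best "default" else "default"

-- ===== PRECONDITION & SPEC =====
def Spec_guess_sector_py (symbol : String) (out : String) : Prop := out = guess_sector_py_alt symbol
instance (symbol : String) (out : String) : Decidable (Spec_guess_sector_py symbol out) := by unfold Spec_guess_sector_py; infer_instance

-- ===== CLAIM (what is proved, stated in full; the proofs are below) =====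
def Claim_equal_guess_sector_py : Prop := ∀ (symbol : String), Dom_guess_sector_py symbol → Spec_guess_sector_py symbol (guess_sector_py symbol)

-- ===== LEMMAS AND PROOFS =====
-- the fold building _EXACT evaluates to this literal association list (a closed term)
theorem pvExact_eq : pvExact = PySem.Dict.mk
    [("NVDA", 0), ("AAPL", 0), ("MSFT", 0), ("GOOGL", 0), ("QUBT", 0), ("PLTR", 0),
     ("WULF", 1), ("RIOT", 1), ("MARA", 1), ("HUT", 1), ("BITF", 1), ("CLSK", 1),
     ("TEVA", 2), ("RGTI", 2), ("OCGN", 2), ("COTI", 2), ("SERA", 2)] := rfl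

-- B's flat min-rank fold started at rank 3 (no exact match), characterised category by category
set_option maxHeartbeats 4000000 in
theorem pvFold3_eq (s : String) :
    pvSubs.foldl (fun best p => if p.2 < best && PySem.Str.isIn p.1 s then p.2 else best) 3 =
      (if PySem.Str.isIn "TECH" s || PySem.Str.isIn "SOFT" s || PySem.Str.isIn "DATA" s then 0
       else if PySem.Str.isIn "MINE" s || PySem.Str.isIn "OIL" s || PySem.Str.isIn "GAS" s then 1
       else if PySem.Str.isIn "BIO" s || PySem.Str.isIn "PHARM" s || PySem.Str.isIn "MED" s then 2
       else 3) := by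
  rcases Bool.eq_false_or_eq_true (PySem.Chars.isIn ['T','E','C','H'] s.toList) with hT|hT <;>
  rcases Bool.eq_false_or_eq_true (PySem.Chars.isIn ['S','O','F','T'] s.toList) with hS|hS <;>
  rcases Bool.eq_false_or_eq_true (PySem.Chars.isIn ['D','A','T','A'] s.toList) with hD|hD <;>
  rcases Bool.eq_false_or_eq_true (PySem.Chars.isIn ['M','I','N','E'] s.toList) with hM|hM <;>
  rcases Bool.eq_false_or_eq_true (PySem.Chars.isIn ['O','I','L'] s.toList) with hO|hO <;>
  rcases Bool.eq_false_or_eq_true (PySem.Chars.isIn ['G','A','S'] s.toList) with hG|hG <;>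
  rcases Bool.eq_false_or_eq_true (PySem.Chars.isIn ['B','I','O'] s.toList) with hB|hB <;>
  rcases Bool.eq_false_or_eq_true (PySem.Chars.isIn ['P','H','A','R','M'] s.toList) with hP|hP <;>
  rcases Bool.eq_false_or_eq_true (PySem.Chars.isIn ['M','E','D'] s.toList) with hMe|hMe <;>
  simp [pvSubs, hT, hS, hD, hM, hO, hG, hB, hP, hMe]

-- ===== VERDICT (by name: the statement is the Claim_ definition above) =====
set_option maxHeartbeats 2000000 in
theorem guess_sector_py_spec : Claim_equal_guess_sector_py := by
  intro s _
  unfold Spec_guess_sector_py guess_sector_py guess_sector_py_alt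
  rw [pvExact_eq]
  by_cases hm : s ∈ ["NVDA", "AAPL", "MSFT", "GOOGL", "QUBT", "PLTR",
                     "WULF", "RIOT", "MARA", "HUT", "BITF", "CLSK",
                     "TEVA", "RGTI", "OCGN", "COTI", "SERA"]
  · simp only [List.mem_cons, List.not_mem_nil, or_false] at hm
    rcases hm with h|h|h|h|h|h|h|h|h|h|h|h|h|h|h|h|h <;> subst h <;> decide
  · simp only [List.mem_cons, List.not_mem_nil, or_false, not_or] at hm
    obtain ⟨h1,h2,h3,h4,h5,h6,h7,h8,h9,h10,h11,h12,h13,h14,h15,h16,h17⟩ := hm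
    have hg : (PySem.Dict.mk
      [("NVDA", (0:Int)), ("AAPL", 0), ("MSFT", 0), ("GOOGL", 0), ("QUBT", 0), ("PLTR", 0),
       ("WULF", 1), ("RIOT", 1), ("MARA", 1), ("HUT", 1), ("BITF", 1), ("CLSK", 1),
       ("TEVA", 2), ("RGTI", 2), ("OCGN", 2), ("COTI", 2), ("SERA", 2)]).getD s 3 = 3 := by
      simp [PySem.Dict.getD, Ne.symm h1, Ne.symm h2, Ne.symm h3,
        Ne.symm h4, Ne.symm h5, Ne.symm h6, Ne.symm h7, Ne.symm h8, Ne.symm h9, Ne.symm h10,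
        Ne.symm h11, Ne.symm h12, Ne.symm h13, Ne.symm h14, Ne.symm h15, Ne.symm h16, Ne.symm h17,
        PySem.Dict.get?, Option.getD]
    rw [hg, pvFold3_eq]
    rcases Bool.eq_false_or_eq_true (PySem.Chars.isIn ['T','E','C','H'] s.toList) with hT|hT <;>
    rcases Bool.eq_false_or_eq_true (PySem.Chars.isIn ['S','O','F','T'] s.toList) with hS|hS <;>
    rcases Bool.eq_false_or_eq_true (PySem.Chars.isIn ['D','A','T','A'] s.toList) with hD|hD <;>
    rcases Bool.eq_false_or_eq_true (PySem.Chars.isIn ['M','I','N','E'] s.toList) with hM|hM <;>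
    rcases Bool.eq_false_or_eq_true (PySem.Chars.isIn ['O','I','L'] s.toList) with hO|hO <;>
    rcases Bool.eq_false_or_eq_true (PySem.Chars.isIn ['G','A','S'] s.toList) with hG|hG <;>
    rcases Bool.eq_false_or_eq_true (PySem.Chars.isIn ['B','I','O'] s.toList) with hB|hB <;>
    rcases Bool.eq_false_or_eq_true (PySem.Chars.isIn ['P','H','A','R','M'] s.toList) with hP|hP <;>
    rcases Bool.eq_false_or_eq_true (PySem.Chars.isIn ['M','E','D'] s.toList) with hMe|hMe <;>
    simp [pvLabels, PySem.List.pyGetD, PySem.List.pyGet?, PySem.List.pyIdx?,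
      hT, hS, hD, hM, hO, hG, hB, hP, hMe, h1, h2, h3, h4, h5, h6, h7, h8, h9, h10,
      h11, h12, h13, h14, h15, h16, h17]
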